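-- pv_equiv track=rewrite | github.com/Aasthaengg/IBMdataset | Python_codes/p02714/s549083812.py | solve
-- ===== SOURCE A (Python) =====
-- def solve(s):
-- 	n = len(s)
-- 	r,g,b = s.count('R'),s.count('G'),s.count('B')
-- 	sub = 0
-- 	for i in range(n):
-- 		for j in range(i+1,n):
-- 			k = 2*j - i
-- 			if(k >= n):
-- 				break
-- 			if(len(set([s[i],s[j],s[k]])) == 3):
-- 				sub += 1
-- 	return r*g*b - sub
-- ===== SOURCE B (Python) =====
-- def solve(s):
--     n = len(s)
--     r, g, b = s.count('R'), s.count('G'), s.count('B')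
--     sub = 0
--     for d in range(1, (n - 1) // 2 + 1):
--         triples = list(zip(s, s[d:], s[2 * d:]))
--         t = sum(1 for x, y, _ in triples if x == y)
--         u = sum(1 for x, _, z in triples if x == z)
--         v = sum(1 for _, y, z in triples if y == z)
--         w = sum(1 for x, y, z in triples if x == y and y == z)
--         sub += len(triples) - (t + u + v) + 2 * w
--     return r * g * b - sub
-- ===== Notes on version B (the rewrite author's own statement) =====
-- stated objective: alternative
-- what changed: B never tests any individual triple for distinctness: for each gap d it zips s with its d- and 2d-shifts, counts the three pairwise equalities and the all-equal triples in whole-list passes, and obtains the distinct-triple count for that gap by inclusion-exclusion (m - (t+u+v) + 2w), whereas A enumerates (i,j) pairs and checks len(set(...))==3 per triple with a break.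
import Mathlib
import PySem

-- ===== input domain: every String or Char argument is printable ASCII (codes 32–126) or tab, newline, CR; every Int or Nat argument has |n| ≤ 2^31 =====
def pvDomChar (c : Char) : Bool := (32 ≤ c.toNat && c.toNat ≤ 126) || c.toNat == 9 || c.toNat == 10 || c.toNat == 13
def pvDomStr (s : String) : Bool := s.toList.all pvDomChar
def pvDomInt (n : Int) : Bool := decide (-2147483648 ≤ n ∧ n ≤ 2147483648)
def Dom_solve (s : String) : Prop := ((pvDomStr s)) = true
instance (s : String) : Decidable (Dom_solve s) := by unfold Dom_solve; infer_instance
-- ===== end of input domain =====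

-- B replaces A's per-triple distinctness test by gap-major whole-list passes
-- (zip with the d- and 2d-shift, count the pairwise equalities) combined by inclusion-exclusion.

-- ===== PORT A =====
-- len(set([a,b,c])) == 3
def pvDist3 (a b c : Char) : Bool := (PySem.Set.ofList [a, b, c]).length == 3

-- inner loop 'for j in range(i+1, n)' with the 'break' when k = 2*j - i >= n
-- (all indices are provably in range, so s[·] is read with getD; exact for Python here)
def solveJ (cs : List Char) (n i j : Nat) (sub : Int) : Int :=
  if j < n then
    let k := 2 * j - i
    if n ≤ k then sub
    else
      solveJ cs n i (j + 1)
        (if pvDist3 (cs.getD i ' ') (cs.getD j ' ') (cs.getD k ' ') then sub + 1 else sub)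
  else sub
termination_by n - j

-- outer loop 'for i in range(n)'
def solveI (cs : List Char) (n i : Nat) (sub : Int) : Int :=
  if i < n then solveI cs n (i + 1) (solveJ cs n i (i + 1) sub) else sub
termination_by n - i

def solve (s : String) : Int :=
  let cs := s.toList
  let n := cs.length
  let r : Int := PySem.Str.count s "R"
  let g : Int := PySem.Str.count s "G"
  let b : Int := PySem.Str.count s "B"
  r * g * b - solveI cs n 0 0

-- ===== PORT B =====
-- one iteration of the gap loop: triples = zip(s, s[d:], s[2d:]);
-- the four equality counts t,u,v,w; contribution m - (t+u+v) + 2w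
def gapTerm (cs : List Char) (d : Int) : Int :=
  let triples := cs.zip ((PySem.List.slice cs (some d) none).zip (PySem.List.slice cs (some (2 * d)) none))
  let t : Int := triples.countP (fun p => p.1 == p.2.1)
  let u : Int := triples.countP (fun p => p.1 == p.2.2)
  let v : Int := triples.countP (fun p => p.2.1 == p.2.2)
  let w : Int := triples.countP (fun p => p.1 == p.2.1 && p.2.1 == p.2.2)
  (triples.length : Int) - (t + u + v) + 2 * w

def solve_alt (s : String) : Int :=
  let cs := s.toList
  let n : Int := cs.length
  let r : Int := PySem.Str.count s "R"
  let g : Int := PySem.Str.count s "G"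
  let b : Int := PySem.Str.count s "B"
  let sub := (PySem.List.pyRange 1 (PySem.Int.floordiv (n - 1) 2 + 1) 1).foldl
    (fun sub d => sub + gapTerm cs d) 0
  r * g * b - sub

-- ===== PRECONDITION & SPEC =====
def Spec_solve (s : String) (out : Int) : Prop := out = solve_alt s
instance (s : String) (out : Int) : Decidable (Spec_solve s out) := by unfold Spec_solve; infer_instance

-- ===== CLAIM (what is proved, stated in full; the proofs are below) =====
def Claim_equal_solve : Prop := ∀ (s : String), Dom_solve s → Spec_solve s (solve s)

-- ===== LEMMAS AND PROOFS =====

-- 0/1 indicator of a distinct triple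
def distI (a b c : Char) : Int := if pvDist3 a b c = true then 1 else 0

-- indicator of A's triple condition at (left i, middle j)
def fA (cs : List Char) (n i j : Nat) : Int :=
  if i < j ∧ 2 * j - i < n ∧ pvDist3 (cs.getD i ' ') (cs.getD j ' ') (cs.getD (2 * j - i) ' ') = true
  then 1 else 0

-- indicator of B's triple condition at (gap d, left i)
def fC (cs : List Char) (n d i : Nat) : Int :=
  if 1 ≤ d ∧ i + 2 * d < n ∧ pvDist3 (cs.getD i ' ') (cs.getD (i + d) ' ') (cs.getD (i + 2 * d) ' ') = true
  then 1 else 0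

-- inclusion-exclusion on one triple of characters
theorem head_ie (x y z : Char) :
    (1 : Int) - ((if x == y then (1:Int) else 0) + (if x == z then (1:Int) else 0)
        + (if y == z then (1:Int) else 0))
      + 2 * (if x == y && y == z then (1:Int) else 0) = distI x y z := by
  by_cases h1 : x = y <;> by_cases h2 : y = z <;> by_cases h3 : x = z <;>
    simp_all [distI, pvDist3, PySem.Set.ofList, PySem.Set.add] <;>
    split_ifs <;> simp_all <;> tauto

-- the zipped inclusion-exclusion expression is the sum of distinct-triple indicators
theorem zip_ie (xs ys zs : List Char) :
    ((xs.zip (ys.zip zs)).length : Int)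
      - (((xs.zip (ys.zip zs)).countP (fun p => p.1 == p.2.1) : Int)
         + ((xs.zip (ys.zip zs)).countP (fun p => p.1 == p.2.2) : Int)
         + ((xs.zip (ys.zip zs)).countP (fun p => p.2.1 == p.2.2) : Int))
      + 2 * ((xs.zip (ys.zip zs)).countP (fun p => p.1 == p.2.1 && p.2.1 == p.2.2) : Int)
    = ∑ i ∈ Finset.range (min xs.length (min ys.length zs.length)),
        distI (xs.getD i ' ') (ys.getD i ' ') (zs.getD i ' ') := by
  induction xs generalizing ys zs with
  | nil => simp
  | cons x xs ih =>
    cases ys with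
    | nil => simp
    | cons y ys =>
      cases zs with
      | nil => simp
      | cons z zs =>
        have hmin : min (xs.length + 1) (min (ys.length + 1) (zs.length + 1))
            = min xs.length (min ys.length zs.length) + 1 := by omega
        simp only [List.zip_cons_cons, List.length_cons, List.countP_cons]
        rw [hmin, Finset.sum_range_succ']
        simp only [List.getD_cons_succ, List.getD_cons_zero]
        have := ih ys zs
        have hh := head_ie x y z
        rw [← this]
        push_cast [apply_ite (Nat.cast : Nat → Int)]
        linarith [hh]

theorem getD_drop (l : List Char) (d i : Nat) :
    (l.drop d).getD i ' ' = l.getD (d + i) ' ' := by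
  simp [List.getD_eq_getElem?_getD, List.getElem?_drop]

-- one gap-loop iteration sums the distinct-triple indicators for that gap
theorem gapTerm_eq (cs : List Char) (dn : Nat) :
    gapTerm cs (dn : Int)
      = ∑ i ∈ Finset.range (cs.length - 2 * dn),
          distI (cs.getD i ' ') (cs.getD (i + dn) ' ') (cs.getD (i + 2 * dn) ' ') := by
  have h2 : ((2:Int) * (dn : Int)) = ((2 * dn : Nat) : Int) := by push_cast; ring
  unfold gapTerm
  rw [h2, PySem.List.slice_from_natCast, PySem.List.slice_from_natCast]
  have := zip_ie cs (cs.drop dn) (cs.drop (2 * dn))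
  rw [this]
  have hm : min cs.length (min (cs.drop dn).length (cs.drop (2 * dn)).length)
      = cs.length - 2 * dn := by
    simp only [List.length_drop]; omega
  rw [hm]
  apply Finset.sum_congr rfl
  intro i _
  rw [getD_drop, getD_drop, Nat.add_comm dn i, Nat.add_comm (2 * dn) i]

-- folding '+ f d' over a shifted range is a sum
theorem foldl_range_add (f : Int → Int) (k : Nat) (s : Int) :
    (((List.range k).map (fun j : Nat => (1:Int) + j)).foldl (fun acc d => acc + f d) s)
      = s + ∑ j ∈ Finset.range k, f (1 + (j : Int)) := by
  induction k generalizing s with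
  | zero => simp
  | succ k ih =>
    rw [List.range_succ, List.map_append, List.foldl_append, ih, Finset.sum_range_succ]
    simp [add_assoc]

-- A's loops compute the double sum of fA (from the left-endpoint/middle indexing)
theorem solveJ_eq (cs : List Char) (n i : Nat) :
    ∀ j sub, i < j → solveJ cs n i j sub = sub + ∑ x ∈ Finset.Ico j n, fA cs n i x := by
  intro j sub hij
  induction' hn : n - j with t ih generalizing j sub
  · rw [solveJ, if_neg (by omega : ¬ j < n), Finset.Ico_eq_empty (by omega), Finset.sum_empty,
      add_zero]
  · have hjn : j < n := by omega
    rw [solveJ, if_pos hjn]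
    by_cases hk : n ≤ 2 * j - i
    · rw [if_pos hk]
      have hz : ∑ x ∈ Finset.Ico j n, fA cs n i x = 0 := by
        apply Finset.sum_eq_zero
        intro x hx
        rw [Finset.mem_Ico] at hx
        unfold fA
        rw [if_neg]
        rintro ⟨h1, h2, _⟩
        omega
      rw [hz, add_zero]
    · rw [if_neg hk, ih (j + 1) _ (by omega) (by omega)]
      rw [Finset.sum_eq_sum_Ico_succ_bot hjn]
      have hfa : fA cs n i j
          = if pvDist3 (cs.getD i ' ') (cs.getD j ' ') (cs.getD (2 * j - i) ' ') then (1 : Int) else 0 := by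
        unfold fA
        by_cases hd : pvDist3 (cs.getD i ' ') (cs.getD j ' ') (cs.getD (2 * j - i) ' ') = true
        · rw [if_pos ⟨hij, by omega, hd⟩, if_pos hd]
        · rw [if_neg (by rintro ⟨_, _, h⟩; exact hd h), if_neg hd]
      rw [hfa]
      by_cases hd : pvDist3 (cs.getD i ' ') (cs.getD j ' ') (cs.getD (2 * j - i) ' ') = true
      · rw [if_pos hd, if_pos hd]; ring
      · rw [if_neg hd, if_neg hd]; ring

theorem fA_zero_of_le (cs : List Char) (n i j : Nat) (h : j ≤ i) : fA cs n i j = 0 := by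
  unfold fA
  rw [if_neg]
  rintro ⟨h1, _, _⟩
  omega

theorem solveI_eq (cs : List Char) (n : Nat) :
    ∀ i sub, solveI cs n i sub = sub + ∑ x ∈ Finset.Ico i n, ∑ y ∈ Finset.range n, fA cs n x y := by
  intro i sub
  induction' hn : n - i with t ih generalizing i sub
  · rw [solveI, if_neg (by omega : ¬ i < n), Finset.Ico_eq_empty (by omega), Finset.sum_empty,
      add_zero]
  · have hin : i < n := by omega
    rw [solveI, if_pos hin, solveJ_eq cs n i (i + 1) sub (by omega), ih _ _ (by omega)]
    rw [Finset.sum_eq_sum_Ico_succ_bot hin]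
    have hrow : ∑ x ∈ Finset.Ico (i + 1) n, fA cs n i x = ∑ y ∈ Finset.range n, fA cs n i y := by
      apply Finset.sum_subset
      · intro x hx
        rw [Finset.mem_Ico] at hx
        rw [Finset.mem_range]
        omega
      · intro x hx hnx
        rw [Finset.mem_range] at hx
        rw [Finset.mem_Ico] at hnx
        exact fA_zero_of_le cs n i x (by omega)
    rw [hrow]
    ring

-- reindexing: (left, middle) ↔ (gap, left)
theorem fA_eq_fC (cs : List Char) (n i j : Nat) : fA cs n i j = fC cs n (j - i) i := by
  unfold fA fC
  by_cases hij : i < j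
  · have h1 : i + (j - i) = j := by omega
    have h2 : i + 2 * (j - i) = 2 * j - i := by omega
    rw [h1, h2]
    have h3 : (i < j ∧ 2 * j - i < n ∧ pvDist3 (cs.getD i ' ') (cs.getD j ' ') (cs.getD (2 * j - i) ' ') = true)
        ↔ (1 ≤ j - i ∧ 2 * j - i < n ∧ pvDist3 (cs.getD i ' ') (cs.getD j ' ') (cs.getD (2 * j - i) ' ') = true) := by
      constructor
      · rintro ⟨_, h, hd⟩; exact ⟨by omega, h, hd⟩
      · rintro ⟨_, h, hd⟩; exact ⟨hij, h, hd⟩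
    simp only [h3]
  · have h0 : j - i = 0 := by omega
    rw [h0]
    split_ifs with h1 h2 <;> first | rfl | (exfalso; omega)

theorem sub_eq (cs : List Char) (n : Nat) :
    ∑ x ∈ Finset.range n, ∑ y ∈ Finset.range n, fA cs n x y
      = ∑ d ∈ Finset.range n, ∑ i ∈ Finset.range n, fC cs n d i := by
  have hA : (∑ x ∈ Finset.range n, ∑ y ∈ Finset.range n, fA cs n x y)
      = ∑ p ∈ Finset.range n ×ˢ Finset.range n, fC cs n (p.2 - p.1) p.1 := by
    rw [← Finset.sum_product']
    exact Finset.sum_congr rfl (fun p _ => fA_eq_fC cs n p.1 p.2)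
  have hB : (∑ d ∈ Finset.range n, ∑ i ∈ Finset.range n, fC cs n d i)
      = ∑ q ∈ Finset.range n ×ˢ Finset.range n, fC cs n q.1 q.2 := by
    rw [← Finset.sum_product']
  rw [hA, hB]
  have hL : ∑ p ∈ (Finset.range n ×ˢ Finset.range n).filter
        (fun p : ℕ × ℕ => p.1 < p.2 ∧ 2 * p.2 - p.1 < n), fC cs n (p.2 - p.1) p.1
      = ∑ p ∈ Finset.range n ×ˢ Finset.range n, fC cs n (p.2 - p.1) p.1 := by
    apply Finset.sum_filter_of_ne
    intro p _ hne
    unfold fC at hne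
    split_ifs at hne with h
    · obtain ⟨h1, h2, _⟩ := h; constructor <;> omega
    · exact absurd rfl hne
  have hR : ∑ q ∈ (Finset.range n ×ˢ Finset.range n).filter
        (fun q : ℕ × ℕ => 1 ≤ q.1 ∧ q.2 + 2 * q.1 < n), fC cs n q.1 q.2
      = ∑ q ∈ Finset.range n ×ˢ Finset.range n, fC cs n q.1 q.2 := by
    apply Finset.sum_filter_of_ne
    intro q _ hne
    unfold fC at hne
    split_ifs at hne with h
    · exact ⟨h.1, h.2.1⟩
    · exact absurd rfl hne
  rw [← hL, ← hR]
  apply Finset.sum_nbij' (i := fun p : ℕ × ℕ => (p.2 - p.1, p.1))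
    (j := fun q : ℕ × ℕ => (q.2, q.2 + q.1))
  · intro p hp
    simp only [Finset.mem_filter, Finset.mem_product, Finset.mem_range] at hp ⊢
    omega
  · intro q hq
    simp only [Finset.mem_filter, Finset.mem_product, Finset.mem_range] at hq ⊢
    omega
  · intro p hp
    simp only [Finset.mem_filter, Finset.mem_product, Finset.mem_range] at hp
    have h1 : p.1 + (p.2 - p.1) = p.2 := by omega
    simp [h1]
  · intro q hq
    simp only [Finset.mem_filter, Finset.mem_product, Finset.mem_range] at hq
    have h1 : q.2 + q.1 - q.2 = q.1 := by omega
    simp [h1]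
  · intro p hp
    rfl

-- B's gap-major sum equals the double sum of fC
theorem sumC_eq (cs : List Char) (n : Nat) (hnn : cs.length = n) :
    ∑ d ∈ Finset.range n, ∑ i ∈ Finset.range n, fC cs n d i
      = ∑ j ∈ Finset.range ((n - 1) / 2), gapTerm cs (1 + (j : Int)) := by
  have hgap : ∀ j : Nat, gapTerm cs (1 + (j : Int))
      = ∑ i ∈ Finset.range (n - 2 * (j + 1)),
          distI (cs.getD i ' ') (cs.getD (i + (j + 1)) ' ') (cs.getD (i + 2 * (j + 1)) ' ') := by
    intro j
    have hc : (1 : Int) + (j : Int) = ((j + 1 : Nat) : Int) := by push_cast; ring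
    rw [hc, gapTerm_eq, hnn]
  have hstep1 : ∀ d ∈ Finset.range n,
      (∑ i ∈ Finset.range n, fC cs n d i)
        = if 1 ≤ d ∧ d ≤ (n - 1) / 2 then
            ∑ i ∈ Finset.range (n - 2 * d),
              distI (cs.getD i ' ') (cs.getD (i + d) ' ') (cs.getD (i + 2 * d) ' ')
          else 0 := by
    intro d _
    by_cases hd : 1 ≤ d ∧ d ≤ (n - 1) / 2
    · rw [if_pos hd]
      have hsub : Finset.range (n - 2 * d) ⊆ Finset.range n := by
        intro x hx
        rw [Finset.mem_range] at hx ⊢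
        omega
      have hz : ∀ i ∈ Finset.range n, i ∉ Finset.range (n - 2 * d) → fC cs n d i = 0 := by
        intro i _ hni
        rw [Finset.mem_range] at hni
        unfold fC
        rw [if_neg]
        rintro ⟨_, h, _⟩
        omega
      rw [← Finset.sum_subset hsub hz]
      apply Finset.sum_congr rfl
      intro i hi
      rw [Finset.mem_range] at hi
      unfold fC distI
      have hlt : i + 2 * d < n := by omega
      by_cases hp : pvDist3 (cs.getD i ' ') (cs.getD (i + d) ' ') (cs.getD (i + 2 * d) ' ') = true
      · rw [if_pos ⟨hd.1, hlt, hp⟩, if_pos hp]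
      · rw [if_neg (by rintro ⟨_, _, h⟩; exact hp h), if_neg hp]
    · rw [if_neg hd]
      apply Finset.sum_eq_zero
      intro i _
      unfold fC
      rw [if_neg]
      rintro ⟨h1, h2, _⟩
      apply hd
      constructor
      · omega
      · omega
  rw [Finset.sum_congr rfl hstep1]
  rw [Finset.sum_ite, Finset.sum_const, smul_zero, add_zero]
  have hset : (Finset.range n).filter (fun d => 1 ≤ d ∧ d ≤ (n - 1) / 2) = Finset.Ico 1 ((n - 1) / 2 + 1) := by
    ext d
    simp only [Finset.mem_filter, Finset.mem_range, Finset.mem_Ico]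
    omega
  rw [hset, Finset.sum_Ico_eq_sum_range]
  simp only [Nat.add_sub_cancel]
  apply Finset.sum_congr rfl
  intro j _
  rw [hgap j]
  have h1 : 1 + j = j + 1 := by omega
  rw [h1]

theorem toNat_floordiv (nn : Nat) :
    (PySem.Int.floordiv ((nn : Int) - 1) 2 + 1 - 1).toNat = (nn - 1) / 2 := by
  rw [add_sub_cancel_right]
  cases nn with
  | zero =>
    rw [PySem.Int.floordiv_eq_ediv_of_pos (by omega)]
    decide
  | succ m =>
    have h : ((m + 1 : Nat) : Int) - 1 = ((m : Nat) : Int) := by push_cast; ring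
    rw [h, PySem.Int.floordiv_eq_ediv_of_pos (by omega : (0:Int) < 2)]
    omega

-- ===== VERDICT (by name: the statement is the Claim_ definition above) =====
theorem solve_spec : Claim_equal_solve := by
  intro s _
  unfold Spec_solve
  simp only [solve, solve_alt]
  have hA := solveI_eq s.toList s.toList.length 0 0
  rw [← Finset.range_eq_Ico] at hA
  rw [hA, zero_add]
  rw [PySem.List.pyRange_one, toNat_floordiv, foldl_range_add, zero_add]
  rw [sub_eq, sumC_eq s.toList s.toList.length rfl]
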